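-- pv_equiv track=rewrite | github.com/wyk18703232953/myResearch | codeComplex/data copy/filteredData/python/quadratic/python_quadratic_0589.py | generate_case
-- ===== SOURCE A (Python) =====
-- def gen(n, b):
--     a = [(x + b) % 3 for x in range(n)]
--     s = ""
--     for i in range(n):
--         if a[i] == 0:
--             s += "R"
--         if a[i] == 1:
--             s += "G"
--         if a[i] == 2:
--             s += "B"
--     return s
--
-- def generate_case(case_id, n):
--     if n <= 0:
--         return 0, 0, ""
--     k = max(1, n // 2)
--     base_pattern = gen(n, case_id % 3)
--     s_list = []
--     for i, ch in enumerate(base_pattern):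
--         if (i + case_id) % 5 == 0:
--             if ch == "R":
--                 s_list.append("G")
--             elif ch == "G":
--                 s_list.append("B")
--
--             else:
--                 s_list.append("R")
--
--         else:
--             s_list.append(ch)
--     s = "".join(s_list)
--     return n, k, s
-- ===== SOURCE B (Python) =====
-- def generate_case(case_id, n):
--     if n <= 0:
--         return 0, 0, ""
--     k = max(1, n // 2)
--     chars = []
--     for i in range(n):
--         idx = ((i + case_id) + (1 if (i + case_id) % 5 == 0 else 0)) % 3
--         chars.append('R' if idx == 0 else 'G' if idx == 1 else 'B')
--     return n, k, "".join(chars)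
-- ===== Notes on version B (the rewrite author's own statement) =====
-- stated objective: simpler
-- what changed: Replaces the build-then-rescan two-pass structure (gen helper materialises a base pattern list and string, then a second enumerate pass mutates it) with a single pass over range(n) computing each letter from a closed-form index ((i+case_id)+(1 if (i+case_id)%5==0 else 0))%3; no helper and no intermediate string.
import Mathlib
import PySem

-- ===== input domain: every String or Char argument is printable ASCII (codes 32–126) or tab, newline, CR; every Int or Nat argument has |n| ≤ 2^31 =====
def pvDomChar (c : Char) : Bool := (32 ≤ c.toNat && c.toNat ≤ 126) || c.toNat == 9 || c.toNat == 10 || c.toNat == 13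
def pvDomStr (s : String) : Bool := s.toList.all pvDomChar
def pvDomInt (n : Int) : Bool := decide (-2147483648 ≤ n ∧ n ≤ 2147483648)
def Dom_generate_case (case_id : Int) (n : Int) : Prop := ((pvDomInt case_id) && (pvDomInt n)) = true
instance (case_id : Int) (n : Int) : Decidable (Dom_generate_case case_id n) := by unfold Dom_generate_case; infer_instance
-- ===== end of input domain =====

-- B fuses A's build-then-rescan two passes into one closed-form pass per index (objective: simpler).

-- ===== PORT A =====
-- helper gen(n, b): builds the base pattern (chars carried as List Char; final String.ofList)
def gen (n : Int) (b : Int) : String :=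
  let a := (PySem.List.pyRange 0 n 1).map (fun x => PySem.Int.mod (x + b) 3)
  -- Python loops 'for i in range(n): … a[i] …'; a[i] visits a's elements in order
  let s := a.foldl (fun s ai =>
    let s := if ai = 0 then s ++ ['R'] else s
    let s := if ai = 1 then s ++ ['G'] else s
    if ai = 2 then s ++ ['B'] else s) []
  String.ofList s

def generate_case (case_id : Int) (n : Int) : Int × Int × String :=
  if n ≤ 0 then (0, 0, "") else
  let k := max 1 (PySem.Int.floordiv n 2)
  let base_pattern := gen n (PySem.Int.mod case_id 3)
  let s_list := (PySem.List.enumerate base_pattern.toList 0).foldl (fun acc p =>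
    if PySem.Int.mod (p.1 + case_id) 5 = 0 then
      if p.2 = 'R' then acc ++ ['G']
      else if p.2 = 'G' then acc ++ ['B']
      else acc ++ ['R']
    else acc ++ [p.2]) []
  (n, k, String.ofList s_list)

-- ===== PORT B =====
def generate_case_alt (case_id : Int) (n : Int) : Int × Int × String :=
  if n ≤ 0 then (0, 0, "") else
  let k := max 1 (PySem.Int.floordiv n 2)
  let chars := (PySem.List.pyRange 0 n 1).map (fun i =>
    let idx := PySem.Int.mod ((i + case_id) + (if PySem.Int.mod (i + case_id) 5 = 0 then 1 else 0)) 3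
    if idx = 0 then 'R' else if idx = 1 then 'G' else 'B')
  (n, k, String.ofList chars)

-- ===== PRECONDITION & SPEC =====
def Spec_generate_case (case_id : Int) (n : Int) (out : Int × Int × String) : Prop := out = generate_case_alt case_id n
instance (case_id : Int) (n : Int) (out : Int × Int × String) : Decidable (Spec_generate_case case_id n out) := by unfold Spec_generate_case; infer_instance

-- ===== CLAIM (what is proved, stated in full; the proofs are below) =====
def Claim_equal_generate_case : Prop := ∀ (case_id : Int) (n : Int), Dom_generate_case case_id n → Spec_generate_case case_id n (generate_case case_id n)

-- ===== LEMMAS AND PROOFS =====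

-- the letter A's gen assigns to a residue in {0,1,2}
def chrA (v : Int) : Char := if v = 0 then 'R' else if v = 1 then 'G' else 'B'

lemma gen_toList (n b : Int) :
    (gen n b).toList = (PySem.List.pyRange 0 n 1).map (fun x => chrA (PySem.Int.mod (x + b) 3)) := by
  unfold gen
  simp only [List.foldl_map]
  have hbody : (fun (s : List Char) (x : Int) =>
      let ai := PySem.Int.mod (x + b) 3
      let s := if ai = 0 then s ++ ['R'] else s
      let s := if ai = 1 then s ++ ['G'] else s
      if ai = 2 then s ++ ['B'] else s)
      = fun s x => s ++ [chrA (PySem.Int.mod (x + b) 3)] := by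
    funext s x
    have h0 : 0 ≤ PySem.Int.mod (x + b) 3 := PySem.Int.mod_nonneg _ (by omega)
    have h3 : PySem.Int.mod (x + b) 3 < 3 := PySem.Int.mod_lt _ (by omega)
    set m := PySem.Int.mod (x + b) 3 with hm
    interval_cases m <;> simp [chrA]
  rw [hbody, PySem.List.foldl_append_singleton_eq_map]
  simp

lemma enum_map_pyRange (f : Int → Char) (k : Nat) :
    ∀ a : Int, PySem.List.enumerate ((PySem.List.pyRange a (a + k) 1).map f) a
      = (PySem.List.pyRange a (a + k) 1).map (fun i => (i, f i)) := by
  induction k with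
  | zero =>
      intro a
      simp
  | succ k ih =>
      intro a
      rw [show a + ((k + 1 : Nat) : Int) = (a + 1) + (k : Nat) by push_cast; ring]
      rw [PySem.List.pyRange_one_cons (by omega)]
      simp only [List.map_cons, PySem.List.enumerate_cons]
      rw [ih (a + 1)]

lemma char_point (c i : Int) :
    (if PySem.Int.mod (i + c) 5 = 0 then
       if chrA (PySem.Int.mod (i + PySem.Int.mod c 3) 3) = 'R' then 'G'
       else if chrA (PySem.Int.mod (i + PySem.Int.mod c 3) 3) = 'G' then 'B'
       else 'R'
     else chrA (PySem.Int.mod (i + PySem.Int.mod c 3) 3))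
    = (let idx := PySem.Int.mod ((i + c) + (if PySem.Int.mod (i + c) 5 = 0 then 1 else 0)) 3
       if idx = 0 then 'R' else if idx = 1 then 'G' else 'B') := by
  simp only [PySem.Int.mod_eq_emod_of_pos (by omega : (0:Int) < 3)]
  have hmm : (i + c % 3) % 3 = (i + c) % 3 := by omega
  rw [hmm]
  have h0 : 0 ≤ (i + c) % 3 := Int.emod_nonneg _ (by omega)
  have h3 : (i + c) % 3 < 3 := Int.emod_lt_of_pos _ (by omega)
  have hv : (i + c) % 3 = 0 ∨ (i + c) % 3 = 1 ∨ (i + c) % 3 = 2 := by omega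
  by_cases h5 : PySem.Int.mod (i + c) 5 = 0 <;>
    rw [PySem.Int.mod_eq_zero_iff_dvd] at h5 <;>
    rcases hv with hv | hv | hv <;>
    · simp [chrA, h5, hv] <;> split_ifs <;> first | rfl | (intros; exfalso; omega)

-- ===== VERDICT (by name: the statement is the Claim_ definition above) =====
theorem generate_case_spec : Claim_equal_generate_case := by
  intro case_id n _
  unfold Spec_generate_case generate_case generate_case_alt
  by_cases hn : n ≤ 0
  · simp [hn]
  · simp only [if_neg hn]
    refine Prod.ext rfl (Prod.ext rfl ?_)
    simp only
    congr 1
    rw [gen_toList]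
    have hk : n = 0 + ((n.toNat : Nat) : Int) := by omega
    rw [hk, enum_map_pyRange, List.foldl_map]
    have hbody : (fun (acc : List Char) (i : Int) =>
        if PySem.Int.mod (i + case_id) 5 = 0 then
          if chrA (PySem.Int.mod (i + PySem.Int.mod case_id 3) 3) = 'R' then acc ++ ['G']
          else if chrA (PySem.Int.mod (i + PySem.Int.mod case_id 3) 3) = 'G' then acc ++ ['B']
          else acc ++ ['R']
        else acc ++ [chrA (PySem.Int.mod (i + PySem.Int.mod case_id 3) 3)])
        = fun acc i => acc ++ [if PySem.Int.mod (i + case_id) 5 = 0 then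
            if chrA (PySem.Int.mod (i + PySem.Int.mod case_id 3) 3) = 'R' then 'G'
            else if chrA (PySem.Int.mod (i + PySem.Int.mod case_id 3) 3) = 'G' then 'B'
            else 'R'
          else chrA (PySem.Int.mod (i + PySem.Int.mod case_id 3) 3)] := by
      funext acc i
      split_ifs <;> rfl
    rw [hbody, PySem.List.foldl_append_singleton_eq_map, List.nil_append]
    congr 1
    funext i
    simpa using char_point case_id i
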